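-- pv_equiv track=rewrite | github.com/ajkerrigan/advent_of_code | 2022/day07/main.py | parse_term_output
-- ===== SOURCE A (Python) =====
-- def parse_term_output(data):
--     parsed = []
--     command, command_output = "", []
--     for line in data.strip().splitlines():
--         line = line.strip()
--         tokens = line.split()
--         if tokens[0] == "$":
--             if command:
--                 parsed.append((command, command_output))
--             command = tokens[1:]
--             command_output = []
--         else:
--             command_output.append(tokens)
--     if command:
--         parsed.append((command, command_output))
--     return parsed
-- ===== SOURCE B (Python) =====
-- def parse_term_output(data):
--     toks = [line.strip().split() for line in data.strip().splitlines()]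
--     n = len(toks)
--     # advance to the first command line (token checks raise on blank lines, as in A)
--     i = 0
--     while i < n and toks[i][0] != "$":
--         i += 1
--     parsed = []
--     while i < n:
--         cmd = toks[i][1:]
--         j = i + 1
--         while j < n and toks[j][0] != "$":
--             j += 1
--         if cmd:
--             parsed.append((cmd, toks[i + 1:j]))
--         i = j
--     return parsed
-- ===== Notes on version B (the rewrite author's own statement) =====
-- stated objective: alternative
-- what changed: A is a one-pass state machine that carries the current command and its output and flushes the pair whenever the next command line arrives; B tokenizes all lines once, skips to the first command line, then emits one (command, output-block) group at a time by scanning each block up to the next command line, with no carried flush state.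
import Mathlib
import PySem

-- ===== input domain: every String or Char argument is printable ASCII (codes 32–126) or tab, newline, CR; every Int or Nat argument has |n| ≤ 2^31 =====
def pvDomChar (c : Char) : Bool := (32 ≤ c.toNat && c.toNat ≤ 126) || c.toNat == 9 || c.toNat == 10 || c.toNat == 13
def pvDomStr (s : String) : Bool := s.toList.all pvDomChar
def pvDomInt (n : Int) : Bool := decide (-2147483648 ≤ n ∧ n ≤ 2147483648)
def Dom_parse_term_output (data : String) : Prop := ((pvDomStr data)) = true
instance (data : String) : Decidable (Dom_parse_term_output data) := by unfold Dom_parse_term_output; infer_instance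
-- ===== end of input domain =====

-- B replaces A's one-pass state machine (carried command/output, flushed on '$') by a
-- group-at-a-time scan: find each command line, span its output block, emit the pair
-- (objective: alternative decomposition, same linear cost).

-- ===== PORT A =====
-- A's `tokens[0]` raises IndexError on a whitespace-only line; the port reads it as
-- `tokens.headD ""` — exact on every input admitted by Pre_parse_term_output (tokens ≠ []).
-- `command`, initially "" and then always a list, is falsy exactly when the list is empty,
-- so the port carries it as a List String starting from [].
def parse_term_output (data : String) : List (List String × List (List String)) :=
  let st := (PySem.Str.splitlines (PySem.Str.strip data)).foldl
    (fun (st : List (List String × List (List String)) × List String × List (List String)) line =>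
      let line := PySem.Str.strip line
      let tokens := PySem.Str.split₀ line
      if tokens.headD "" = "$" then
        ((if st.2.1 ≠ [] then st.1 ++ [(st.2.1, st.2.2)] else st.1), tokens.tail, [])
      else
        (st.1, st.2.1, st.2.2 ++ [tokens]))
    ([], [], [])
  if st.2.1 ≠ [] then st.1 ++ [(st.2.1, st.2.2)] else st.1

-- ===== PORT B =====
-- inner `while j < n and toks[j][0] != "$"` loop of Source B: splits a suffix into the
-- output block before the next command line and the remainder (cursor ↦ suffix recursion);
-- `toks[j][0]` is read as `headD ""`, exact under Pre_parse_term_output as in port A.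
def pvSpanBody : List (List String) → List (List String) × List (List String)
  | [] => ([], [])
  | t :: rest =>
    if t.headD "" ≠ "$" then
      let p := pvSpanBody rest
      (t :: p.1, p.2)
    else ([], t :: rest)

theorem pvSpanBody_snd_length_le (ts : List (List String)) : (pvSpanBody ts).2.length ≤ ts.length := by
  induction ts with
  | nil => simp [pvSpanBody]
  | cons t rest ih =>
    simp only [pvSpanBody]
    split
    · exact Nat.le_succ_of_le ih
    · simp

-- outer `while i < n` loop of Source B: one group per iteration
def pvGroups : List (List String) → List (List String × List (List String))
  | [] => []
  | t :: rest =>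
    let p := pvSpanBody rest
    (if t.tail ≠ [] then [(t.tail, p.1)] else []) ++ pvGroups p.2
termination_by ts => ts.length
decreasing_by
  exact Nat.lt_succ_of_le (pvSpanBody_snd_length_le rest)

-- leading `while i < n and toks[i][0] != "$"` loop of Source B
def pvDropToCmd : List (List String) → List (List String)
  | [] => []
  | t :: rest => if t.headD "" ≠ "$" then pvDropToCmd rest else t :: rest

def parse_term_output_alt (data : String) : List (List String × List (List String)) :=
  let toks := (PySem.Str.splitlines (PySem.Str.strip data)).map
    (fun line => PySem.Str.split₀ (PySem.Str.strip line))
  pvGroups (pvDropToCmd toks)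

-- ===== PRECONDITION & SPEC =====
-- Pre_ excludes exactly the inputs containing a whitespace-only interior line, on which
-- Python A (and Python B) raise IndexError at tokens[0]; A returns on every other input.
def Pre_parse_term_output (data : String) : Prop :=
  ∀ l ∈ PySem.Str.splitlines (PySem.Str.strip data), PySem.Str.split₀ (PySem.Str.strip l) ≠ []
instance (data : String) : Decidable (Pre_parse_term_output data) := by unfold Pre_parse_term_output; infer_instance

def pvWitness_parse_term_output : String := "$ cd a\n$ ls\n123 b.txt\ndir c"

def Spec_parse_term_output (data : String) (out : List (List String × List (List String))) : Prop := out = parse_term_output_alt data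
instance (data : String) (out : List (List String × List (List String))) : Decidable (Spec_parse_term_output data out) := by unfold Spec_parse_term_output; infer_instance

-- ===== CLAIM (what is proved, stated in full; the proofs are below) =====
def Claim_equal_parse_term_output : Prop := ∀ (data : String), Dom_parse_term_output data → Pre_parse_term_output data → Spec_parse_term_output data (parse_term_output data)

-- ===== LEMMAS AND PROOFS =====

-- A's per-line state machine, written as a recursion with the carried (command, output) state
def pvFArec : List String → List String → List (List String) → List (List String × List (List String))
  | [], c, o => if c ≠ [] then [(c, o)] else []
  | l :: rest, c, o =>
    let t := PySem.Str.split₀ (PySem.Str.strip l)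
    if t.headD "" = "$" then
      (if c ≠ [] then [(c, o)] else []) ++ pvFArec rest t.tail []
    else pvFArec rest c (o ++ [t])

theorem pvFoldA_eq_pvFArec (lines : List String) :
    ∀ (p : List (List String × List (List String))) (c : List String) (o : List (List String)),
    (let st := lines.foldl
      (fun (st : List (List String × List (List String)) × List String × List (List String)) line =>
        let line := PySem.Str.strip line
        let tokens := PySem.Str.split₀ line
        if tokens.headD "" = "$" then
          ((if st.2.1 ≠ [] then st.1 ++ [(st.2.1, st.2.2)] else st.1), tokens.tail, [])
        else
          (st.1, st.2.1, st.2.2 ++ [tokens]))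
      (p, c, o)
     if st.2.1 ≠ [] then st.1 ++ [(st.2.1, st.2.2)] else st.1) = p ++ pvFArec lines c o := by
  induction lines with
  | nil =>
    intro p c o
    simp only [List.foldl, pvFArec]
    split <;> simp
  | cons l rest ih =>
    intro p c o
    simp only [List.foldl, pvFArec]
    by_cases h : (PySem.Str.split₀ (PySem.Str.strip l)).headD "" = "$"
    · simp only [h, if_pos rfl, if_true]
      by_cases hc : c ≠ []
      · simp only [if_pos hc]
        rw [ih]
        simp
      · simp only [if_neg hc]
        rw [ih]
        simp at hc
        simp [hc]
    · simp only [if_neg h]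
      rw [ih]

theorem pvFArec_eq_groups (lines : List String) :
    ∀ (c : List String) (o : List (List String)),
    pvFArec lines c o =
      (if c ≠ [] then [(c, o ++ (pvSpanBody (lines.map (fun l => PySem.Str.split₀ (PySem.Str.strip l)))).1)] else [])
        ++ pvGroups (pvSpanBody (lines.map (fun l => PySem.Str.split₀ (PySem.Str.strip l)))).2 := by
  induction lines with
  | nil =>
    intro c o
    simp [pvFArec, pvSpanBody, pvGroups]
  | cons l rest ih =>
    intro c o
    simp only [pvFArec, List.map]
    by_cases h : (PySem.Str.split₀ (PySem.Str.strip l)).headD "" = "$"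
    · simp only [h, if_pos rfl, if_true]
      rw [ih]
      have hspan : pvSpanBody ((PySem.Str.split₀ (PySem.Str.strip l)) ::
          rest.map (fun l => PySem.Str.split₀ (PySem.Str.strip l)))
          = ([], (PySem.Str.split₀ (PySem.Str.strip l)) ::
              rest.map (fun l => PySem.Str.split₀ (PySem.Str.strip l))) := by
        simp only [pvSpanBody]
        rw [if_neg (fun hne => hne h)]
      rw [hspan]
      simp only [pvGroups]
      simp
    · have hspan : pvSpanBody ((PySem.Str.split₀ (PySem.Str.strip l)) ::
          rest.map (fun l => PySem.Str.split₀ (PySem.Str.strip l)))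
          = ((PySem.Str.split₀ (PySem.Str.strip l)) ::
              (pvSpanBody (rest.map (fun l => PySem.Str.split₀ (PySem.Str.strip l)))).1,
             (pvSpanBody (rest.map (fun l => PySem.Str.split₀ (PySem.Str.strip l)))).2) := by
        simp only [pvSpanBody]
        rw [if_pos h]
      simp only [if_neg h]
      rw [ih, hspan]
      simp

theorem pvDropToCmd_eq_span_snd (ts : List (List String)) : pvDropToCmd ts = (pvSpanBody ts).2 := by
  induction ts with
  | nil => simp [pvDropToCmd, pvSpanBody]
  | cons t rest ih =>
    simp only [pvDropToCmd, pvSpanBody]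
    split
    · exact ih
    · simp

-- ===== VERDICT (by name: the statement is the Claim_ definition above) =====
theorem parse_term_output_spec : Claim_equal_parse_term_output := by
  intro data _ _
  unfold Spec_parse_term_output parse_term_output parse_term_output_alt
  rw [pvFoldA_eq_pvFArec, pvFArec_eq_groups]
  simp [pvDropToCmd_eq_span_snd]
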